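-- pv_equiv track=rewrite | github.com/mandcony/quantoniumos | core/encryption/detailed_avalanche_test.py | visualize_bit_changes
-- ===== SOURCE A (Python) =====
-- def visualize_bit_changes(bytes1, bytes2):
--     """Show exactly which bits changed between two byte sequences"""
--     changes = []
--     for b1, b2 in zip(bytes1, bytes2):
--         # Get binary representation of each byte
--         bits1 = format(b1, '08b')
--         bits2 = format(b2, '08b')
--         # Compare bits and mark changes
--         diff = ''
--         for bit1, bit2 in zip(bits1, bits2):
--             if bit1 == bit2:
--                 diff += '.'  # No change
--             else:
--                 diff += 'X'  # Bit changed
--         changes.append((bits1, bits2, diff))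
--     return changes
-- ===== SOURCE B (Python) =====
-- def visualize_bit_changes(bytes1, bytes2):
--     """Show exactly which bits changed between two byte sequences"""
--     def mask(s1, s2):
--         if not s1 or not s2:
--             return ''
--         head = '.' if s1[0] == s2[0] else 'X'
--         return head + mask(s1[1:], s2[1:])
--     return [(format(b1, '08b'), format(b2, '08b'),
--              mask(format(b1, '08b'), format(b2, '08b')))
--             for b1, b2 in zip(bytes1, bytes2)]
-- ===== Notes on version B (the rewrite author's own statement) =====
-- stated objective: alternative
-- what changed: Replaces A's two accumulator loops (list-append outer loop and string-concatenation inner loop) by a single list comprehension over zip plus a recursive two-string mask helper.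
import Mathlib
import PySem

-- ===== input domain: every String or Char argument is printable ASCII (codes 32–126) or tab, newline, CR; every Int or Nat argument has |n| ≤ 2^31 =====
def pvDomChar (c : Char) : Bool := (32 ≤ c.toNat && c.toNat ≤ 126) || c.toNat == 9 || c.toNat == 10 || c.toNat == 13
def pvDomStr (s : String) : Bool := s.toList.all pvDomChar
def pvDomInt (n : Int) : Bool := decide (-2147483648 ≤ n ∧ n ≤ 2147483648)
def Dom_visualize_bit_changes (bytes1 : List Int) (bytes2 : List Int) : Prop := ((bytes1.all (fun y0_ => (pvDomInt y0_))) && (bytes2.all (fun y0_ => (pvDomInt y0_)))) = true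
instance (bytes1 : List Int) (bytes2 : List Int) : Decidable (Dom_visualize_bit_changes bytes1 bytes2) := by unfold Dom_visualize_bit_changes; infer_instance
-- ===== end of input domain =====

-- B replaces A's two accumulator loops by a list comprehension over zip plus a
-- recursive two-string mask helper; same O(n) cost, different decomposition.


-- ===== PORT A =====
-- shared helper: Python's builtin format(n, '08b') (binary, zero-padded to
-- width 8 including the sign character for negative n); both Pythons call it.
def pvBinDigits (n : Nat) : List Char :=
  if h : n = 0 then [] else pvBinDigits (n / 2) ++ [if n % 2 == 1 then '1' else '0']
decreasing_by exact Nat.div_lt_self (Nat.pos_of_ne_zero h) (by norm_num)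

def format08b (z : Int) : String :=
  if z < 0 then
    let ds := pvBinDigits (Int.toNat (-z))
    String.ofList ('-' :: (List.replicate (8 - 1 - ds.length) '0' ++ ds))
  else
    let ds := if z = 0 then ['0'] else pvBinDigits (Int.toNat z)
    String.ofList (List.replicate (8 - ds.length) '0' ++ ds)

def visualize_bit_changes (bytes1 : List Int) (bytes2 : List Int) : List (String × String × String) :=
  (List.zip bytes1 bytes2).foldl
    (fun changes b =>
      let bits1 := format08b b.1
      let bits2 := format08b b.2
      let diff := (List.zip bits1.toList bits2.toList).foldl
        (fun d c => if c.1 == c.2 then d ++ "." else d ++ "X") ""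
      changes ++ [(bits1, bits2, diff)])
    []

-- ===== PORT B =====
def maskChars : List Char → List Char → List Char
  | [], _ => []
  | _, [] => []
  | c1 :: t1, c2 :: t2 => (if c1 == c2 then '.' else 'X') :: maskChars t1 t2

def visualize_bit_changes_alt (bytes1 : List Int) (bytes2 : List Int) : List (String × String × String) :=
  (List.zip bytes1 bytes2).map
    (fun b => (format08b b.1, format08b b.2,
               String.ofList (maskChars (format08b b.1).toList (format08b b.2).toList)))

-- ===== PRECONDITION & SPEC =====
def Spec_visualize_bit_changes (bytes1 : List Int) (bytes2 : List Int) (out : List (String × String × String)) : Prop := out = visualize_bit_changes_alt bytes1 bytes2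
instance (bytes1 : List Int) (bytes2 : List Int) (out : List (String × String × String)) : Decidable (Spec_visualize_bit_changes bytes1 bytes2 out) := by unfold Spec_visualize_bit_changes; infer_instance

-- ===== CLAIM =====
def Claim_equal_visualize_bit_changes : Prop := ∀ (bytes1 : List Int) (bytes2 : List Int), Dom_visualize_bit_changes bytes1 bytes2 → Spec_visualize_bit_changes bytes1 bytes2 (visualize_bit_changes bytes1 bytes2)

-- ===== LEMMAS AND PROOFS =====
theorem foldl_mask (l1 l2 : List Char) (s : String) :
    (List.zip l1 l2).foldl (fun d c => if c.1 == c.2 then d ++ "." else d ++ "X") s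
      = s ++ String.ofList (maskChars l1 l2) := by
  induction l1 generalizing l2 s with
  | nil => simp [maskChars]
  | cons c1 t1 ih =>
    cases l2 with
    | nil => simp [maskChars]
    | cons c2 t2 =>
      simp only [List.zip_cons_cons, List.foldl_cons, ih, maskChars]
      by_cases h : c1 == c2 <;>
        simp only [h, if_true, if_false, Bool.false_eq_true] <;>
        rw [String.append_assoc, ← List.singleton_append, String.ofList_append]

theorem foldl_snoc {α β : Type} (l : List α) (g : α → β) (acc : List β) :
    l.foldl (fun ch b => ch ++ [g b]) acc = acc ++ l.map g := by
  induction l generalizing acc with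
  | nil => simp
  | cons a t ih => simp [ih]

-- ===== VERDICT =====
theorem visualize_bit_changes_spec : Claim_equal_visualize_bit_changes := by
  intro bytes1 bytes2 _
  unfold Spec_visualize_bit_changes visualize_bit_changes visualize_bit_changes_alt
  rw [foldl_snoc]
  simp only [List.nil_append]
  apply List.map_congr_left
  intro b _
  simp only [foldl_mask]
  simp
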